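-- pv_equiv track=rewrite | github.com/ZabdiReyes/dockerTalentLink | backend/app/parser/educacion.py | merge_adjacent_entries
-- ===== SOURCE A (Python) =====
-- def merge_adjacent_entries(entries: list) -> list:
--     merged = []
--     i = 0
--     while i < len(entries):
--         current = entries[i]
--         if 'Start' not in current and 'End' not in current:
--             if i + 1 < len(entries):
--                 next_entry = entries[i + 1]
--                 if 'Start' not in next_entry and 'End' not in next_entry:
--                     degree_info = next_entry.get('Institution', '')
--                     if 'Degree' in current:
--                         current['Degree'] = (current['Degree'] + " " + degree_info).strip()
--                     else:
--                         current['Degree'] = degree_info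
--                     i += 2
--                     merged.append(current)
--                     continue
--         merged.append(current)
--         i += 1
--     return merged
-- ===== SOURCE B (Python) =====
-- def merge_adjacent_entries(entries: list) -> list:
--     merged = []
--     pending = None  # last seen no-Start/End entry, not yet committed to merged
--     for e in entries:
--         if 'Start' not in e and 'End' not in e:
--             if pending is None:
--                 pending = e
--             else:
--                 degree_info = e.get('Institution', '')
--                 if 'Degree' in pending:
--                     pending['Degree'] = (pending['Degree'] + " " + degree_info).strip()
--                 else:
--                     pending['Degree'] = degree_info
--                 merged.append(pending)
--                 pending = None
--         else:
--             if pending is not None: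
--                 merged.append(pending)
--                 pending = None
--             merged.append(e)
--     if pending is not None:
--         merged.append(pending)
--     return merged
-- ===== Notes on version B (the rewrite author's own statement) =====
-- stated objective: idiomatic
-- what changed: Replaced the index-based while loop with entries[i+1] lookahead by a single for-loop over the entries carrying a 'pending' accumulator (the last uncommitted no-Start/End entry), committing or merging it as the next entry is seen.
import Mathlib
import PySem

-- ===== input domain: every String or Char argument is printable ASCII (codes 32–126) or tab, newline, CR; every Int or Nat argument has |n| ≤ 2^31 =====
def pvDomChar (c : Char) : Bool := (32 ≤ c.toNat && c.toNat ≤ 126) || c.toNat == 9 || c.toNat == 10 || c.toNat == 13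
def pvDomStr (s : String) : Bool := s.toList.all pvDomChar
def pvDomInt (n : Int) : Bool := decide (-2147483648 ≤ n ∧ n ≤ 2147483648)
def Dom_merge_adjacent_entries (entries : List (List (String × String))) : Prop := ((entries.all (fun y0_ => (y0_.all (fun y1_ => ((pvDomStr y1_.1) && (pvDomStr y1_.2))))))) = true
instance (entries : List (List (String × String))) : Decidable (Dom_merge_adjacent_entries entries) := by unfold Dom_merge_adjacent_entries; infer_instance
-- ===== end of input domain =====

-- B replaces A's index-stepping while loop with lookahead by a single forward pass
-- carrying a 'pending' accumulator; same return value (both Pythons mutate the input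
-- dicts in place identically, the theorem is about the return value).

-- shared dict primitives (each entry is a Python dict, represented as its items list)
-- 'Start' not in e and 'End' not in e
def pvNoSE (d : List (String × String)) : Bool :=
  !(PySem.Dict.mk d).contains "Start" && !(PySem.Dict.mk d).contains "End"

-- the degree-merge both Pythons perform on a pair of no-Start/End dicts
def pvMergeDeg (c n : List (String × String)) : List (String × String) :=
  let degree_info := (PySem.Dict.mk n).getD "Institution" ""
  if (PySem.Dict.mk c).contains "Degree" then
    ((PySem.Dict.mk c).insert "Degree"
      (PySem.Str.strip ((PySem.Dict.mk c).getD "Degree" "" ++ " " ++ degree_info))).items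
  else
    ((PySem.Dict.mk c).insert "Degree" degree_info).items

-- ===== PORT A =====
-- A's while loop over index i with lookahead entries[i+1], as structural recursion on
-- the suffix entries[i:] (i+=2 consumes two elements, i+=1 consumes one).
def merge_adjacent_entries (entries : List (List (String × String))) : List (List (String × String)) :=
  match entries with
  | [] => []
  | c :: rest =>
    if pvNoSE c then
      match _h : rest with
      | n :: rest' =>
        if pvNoSE n then pvMergeDeg c n :: merge_adjacent_entries rest'
        else c :: merge_adjacent_entries rest
      | [] => c :: merge_adjacent_entries rest
    else c :: merge_adjacent_entries rest
termination_by entries.length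
decreasing_by all_goals simp_all

-- ===== PORT B =====
-- Source B's loop body: state = (merged, pending)
def pvStepB (st : List (List (String × String)) × Option (List (String × String)))
    (e : List (String × String)) :
    List (List (String × String)) × Option (List (String × String)) :=
  if pvNoSE e then
    match st.2 with
    | none => (st.1, some e)
    | some p => (st.1 ++ [pvMergeDeg p e], none)
  else
    match st.2 with
    | some p => (st.1 ++ [p] ++ [e], none)
    | none => (st.1 ++ [e], none)

-- Source B's trailing 'if pending is not None: merged.append(pending)'
def pvFinB (st : List (List (String × String)) × Option (List (String × String))) :
    List (List (String × String)) :=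
  match st.2 with
  | some p => st.1 ++ [p]
  | none => st.1

def merge_adjacent_entries_alt (entries : List (List (String × String))) : List (List (String × String)) :=
  pvFinB (entries.foldl pvStepB ([], none))

-- ===== PRECONDITION & SPEC =====
def Spec_merge_adjacent_entries (entries : List (List (String × String))) (out : List (List (String × String))) : Prop := out = merge_adjacent_entries_alt entries
instance (entries : List (List (String × String))) (out : List (List (String × String))) : Decidable (Spec_merge_adjacent_entries entries out) := by unfold Spec_merge_adjacent_entries; infer_instance

-- ===== CLAIM (what is proved, stated in full; the proofs are below) =====
def Claim_equal_merge_adjacent_entries : Prop := ∀ (entries : List (List (String × String))), Dom_merge_adjacent_entries entries → Spec_merge_adjacent_entries entries (merge_adjacent_entries entries)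

-- ===== LEMMAS AND PROOFS =====

theorem mA_nil : merge_adjacent_entries [] = [] := by
  rw [merge_adjacent_entries.eq_def]

theorem mA_cons_not (e : List (String × String)) (rest : List (List (String × String)))
    (h : pvNoSE e = false) :
    merge_adjacent_entries (e :: rest) = e :: merge_adjacent_entries rest := by
  rw [merge_adjacent_entries.eq_def]; simp [h]

theorem mA_one (e : List (String × String)) (h : pvNoSE e = true) :
    merge_adjacent_entries [e] = [e] := by
  rw [merge_adjacent_entries.eq_def]; simp [h, mA_nil]

theorem mA_two_se (e n : List (String × String)) (rest : List (List (String × String)))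
    (he : pvNoSE e = true) (hn : pvNoSE n = true) :
    merge_adjacent_entries (e :: n :: rest) = pvMergeDeg e n :: merge_adjacent_entries rest := by
  rw [merge_adjacent_entries.eq_def]; simp [he, hn]

theorem mA_two_not (e n : List (String × String)) (rest : List (List (String × String)))
    (he : pvNoSE e = true) (hn : pvNoSE n = false) :
    merge_adjacent_entries (e :: n :: rest) = e :: merge_adjacent_entries (n :: rest) := by
  rw [merge_adjacent_entries.eq_def]; simp [he, hn]

-- what A computes from a loop state (pending = the last uncommitted no-Start/End entry)
def pvSpecMA : Option (List (String × String)) → List (List (String × String)) → List (List (String × String))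
  | none, l => merge_adjacent_entries l
  | some c, [] => [c]
  | some c, n :: rest =>
    if pvNoSE n then pvMergeDeg c n :: merge_adjacent_entries rest
    else c :: merge_adjacent_entries (n :: rest)

theorem pvSpecMA_some (e : List (String × String)) (rest : List (List (String × String)))
    (h : pvNoSE e = true) :
    merge_adjacent_entries (e :: rest) = pvSpecMA (some e) rest := by
  match rest with
  | [] => simp [pvSpecMA, mA_one e h]
  | n :: rest' =>
    by_cases hn : pvNoSE n = true
    · simp [pvSpecMA, hn, mA_two_se e n rest' h hn]
    · simp [pvSpecMA, hn, mA_two_not e n rest' h (by simp_all)]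

theorem pv_loop_spec (l : List (List (String × String)))
    (acc : List (List (String × String))) (p : Option (List (String × String))) :
    pvFinB (l.foldl pvStepB (acc, p)) = acc ++ pvSpecMA p l := by
  induction l generalizing acc p with
  | nil => cases p <;> simp [pvFinB, pvSpecMA, mA_nil]
  | cons e rest ih =>
    simp only [List.foldl_cons]
    by_cases h : pvNoSE e = true
    · cases p with
      | none =>
        rw [show pvStepB (acc, none) e = (acc, some e) from by simp [pvStepB, h], ih,
          pvSpecMA, ← pvSpecMA_some e rest h]
      | some c =>
        rw [show pvStepB (acc, some c) e = (acc ++ [pvMergeDeg c e], none) from by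
          simp [pvStepB, h], ih]
        simp [pvSpecMA, h]
    · cases p with
      | none =>
        rw [show pvStepB (acc, none) e = (acc ++ [e], none) from by simp [pvStepB, h], ih]
        simp [pvSpecMA, mA_cons_not e rest (by simp_all)]
      | some c =>
        rw [show pvStepB (acc, some c) e = (acc ++ [c] ++ [e], none) from by
          simp [pvStepB, h], ih]
        simp [pvSpecMA, h, mA_cons_not e rest (by simp_all)]

-- ===== VERDICT (by name: the statement is the Claim_ definition above) =====
theorem merge_adjacent_entries_spec : Claim_equal_merge_adjacent_entries := by
  intro entries _
  unfold Spec_merge_adjacent_entries merge_adjacent_entries_alt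
  rw [pv_loop_spec]
  simp [pvSpecMA]
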